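-- pv_equiv track=rewrite | github.com/TioPig/Recetas-Del-Mundo | Base de datos a instalar/scripts/convert_receta_to_csv.py | split_tuples
-- ===== SOURCE A (Python) =====
-- def split_tuples(block):
--     tuples = []
--     i = 0
--     n = len(block)
--     while i < n:
--         # find opening parenthesis
--         while i < n and block[i] != '(':
--             i += 1
--         if i >= n:
--             break
--         start = i
--         i += 1
--         depth = 1
--         in_str = False
--         esc = False
--         while i < n and depth > 0:
--             ch = block[i]
--             if ch == "'" and not esc:
--                 in_str = not in_str
--             if ch == '\\' and not esc:
--                 esc = True
--                 i += 1
--                 continue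
--             else:
--                 esc = False
--             if not in_str:
--                 if ch == '(':
--                     depth += 1
--                 elif ch == ')':
--                     depth -= 1
--             i += 1
--         end = i
--         tuples.append(block[start:end])
--     return tuples
-- ===== SOURCE B (Python) =====
-- def split_tuples(block):
--     # Single flat state-machine pass over the characters instead of A's nested
--     # find-paren / consume-tuple loops.
--     tuples = []
--     depth = 0
--     in_str = False
--     esc = False
--     start = 0
--     for i, ch in enumerate(block):
--         if depth == 0:
--             if ch == '(':
--                 start = i
--                 depth = 1
--                 in_str = False
--                 esc = False
--         else:
--             if ch == "'" and not esc:
--                 in_str = not in_str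
--             if ch == '\\' and not esc:
--                 esc = True
--                 continue
--             esc = False
--             if not in_str:
--                 if ch == '(':
--                     depth += 1
--                 elif ch == ')':
--                     depth -= 1
--                     if depth == 0:
--                         tuples.append(block[start:i + 1])
--     if depth > 0:
--         tuples.append(block[start:])
--     return tuples
-- ===== Notes on version B (the rewrite author's own statement) =====
-- stated objective: simpler
-- what changed: Replaced A's nested loops (an outer scan for an opening parenthesis plus an inner tuple-consuming loop restarted per tuple) by a single flat pass over enumerate(block) carrying depth/in_str/esc state, appending a tuple whenever depth returns to 0 and flushing an unclosed tuple at the end.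
import Mathlib
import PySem

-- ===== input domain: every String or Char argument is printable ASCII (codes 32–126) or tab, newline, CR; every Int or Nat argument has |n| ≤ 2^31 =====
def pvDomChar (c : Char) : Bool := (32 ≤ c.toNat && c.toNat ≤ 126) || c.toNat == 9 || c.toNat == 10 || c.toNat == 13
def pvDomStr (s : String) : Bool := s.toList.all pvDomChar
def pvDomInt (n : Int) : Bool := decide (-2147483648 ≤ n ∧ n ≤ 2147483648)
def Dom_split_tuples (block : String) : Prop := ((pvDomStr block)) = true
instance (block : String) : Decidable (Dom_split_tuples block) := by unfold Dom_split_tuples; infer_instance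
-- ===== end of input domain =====

-- B replaces A's nested find-paren/consume-tuple loops by one flat state-machine pass (same cost; simpler flow).

-- ===== PORT A =====
-- helpers over l = block.toList, n = l.length; block[i] for 0 ≤ i < n is l.getD i ' ' (exact there);
-- block[a:b] for 0 ≤ a ≤ b ≤ n is (l.drop a).take (b-a) (exact there). Each while loop is structural
-- recursion on the exact iteration count n - i (the loop index i rises by 1 per iteration, so the
-- count n - i reaches 0 exactly when i ≥ n, the loop's own exit test).

-- inner "while i < n and block[i] != '(':" loop; returns the final i
def aFindGo (l : List Char) (n i : Nat) : Nat → Nat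
  | 0 => i
  | fuel+1 =>
    if i < n then
      if l.getD i ' ' != '(' then aFindGo l n (i+1) fuel else i
    else i

def aFind (l : List Char) (n i : Nat) : Nat := aFindGo l n i (n - i)

-- inner "while i < n and depth > 0:" loop; returns the final i (= end)
def aConsumeGo (l : List Char) (n i depth : Nat) (in_str esc : Bool) : Nat → Nat
  | 0 => i
  | fuel+1 =>
    if i < n ∧ 0 < depth then
      let ch := l.getD i ' '
      let in_str' := if ch == '\'' && !esc then !in_str else in_str
      if ch == '\\' && !esc then
        aConsumeGo l n (i+1) depth in_str' true fuel
      else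
        if !in_str' then
          if ch == '(' then aConsumeGo l n (i+1) (depth+1) in_str' false fuel
          else if ch == ')' then aConsumeGo l n (i+1) (depth-1) in_str' false fuel
          else aConsumeGo l n (i+1) depth in_str' false fuel
        else aConsumeGo l n (i+1) depth in_str' false fuel
    else i

def aConsume (l : List Char) (n i depth : Nat) (in_str esc : Bool) : Nat :=
  aConsumeGo l n i depth in_str esc (n - i)

-- outer "while i < n:" loop (i jumps to the returned end, so n - i still bounds the iterations)
def aOuterGo (l : List Char) (n i : Nat) (acc : List String) : Nat → List String
  | 0 => acc
  | fuel+1 =>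
    if i < n then
      let j := aFind l n i
      if j < n then
        let e := aConsume l n (j+1) 1 false false
        aOuterGo l n e (acc ++ [String.ofList ((l.drop j).take (e - j))]) fuel
      else acc
    else acc

def aOuter (l : List Char) (n i : Nat) (acc : List String) : List String :=
  aOuterGo l n i acc (n - i)

def split_tuples (block : String) : List String :=
  aOuter block.toList block.toList.length 0 []

-- ===== PORT B =====
-- flat pass: structural recursion over the remaining chars, i the running index ("for i, ch in enumerate(block)")
def bGo (l : List Char) (i : Nat) (rest : List Char) (depth : Nat) (in_str esc : Bool)
    (start : Nat) (acc : List String) : List String :=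
  match rest with
  | [] => if 0 < depth then acc ++ [String.ofList (l.drop start)] else acc
  | ch :: rest' =>
    if depth = 0 then
      if ch == '(' then bGo l (i+1) rest' 1 false false i acc
      else bGo l (i+1) rest' 0 in_str esc start acc
    else
      if ch == '\\' && !esc then
        bGo l (i+1) rest' depth (if ch == '\'' && !esc then !in_str else in_str) true start acc
      else
        if !(if ch == '\'' && !esc then !in_str else in_str) then
          if ch == '(' then
            bGo l (i+1) rest' (depth+1) (if ch == '\'' && !esc then !in_str else in_str) false start acc
          else if ch == ')' then
            if depth - 1 = 0 then
              bGo l (i+1) rest' (depth-1) (if ch == '\'' && !esc then !in_str else in_str) false start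
                (acc ++ [String.ofList ((l.drop start).take (i+1-start))])
            else
              bGo l (i+1) rest' (depth-1) (if ch == '\'' && !esc then !in_str else in_str) false start acc
          else bGo l (i+1) rest' depth (if ch == '\'' && !esc then !in_str else in_str) false start acc
        else bGo l (i+1) rest' depth (if ch == '\'' && !esc then !in_str else in_str) false start acc

def split_tuples_alt (block : String) : List String :=
  bGo block.toList 0 block.toList 0 false false 0 []

-- ===== PRECONDITION & SPEC =====
def Spec_split_tuples (block : String) (out : List String) : Prop := out = split_tuples_alt block
instance (block : String) (out : List String) : Decidable (Spec_split_tuples block out) := by unfold Spec_split_tuples; infer_instance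

-- ===== CLAIM (what is proved, stated in full; the proofs are below) =====
def Claim_equal_split_tuples : Prop := ∀ (block : String), Dom_split_tuples block → Spec_split_tuples block (split_tuples block)

-- ===== LEMMAS AND PROOFS =====

theorem aFind_ge (l : List Char) (n : Nat) : ∀ (fuel i : Nat), i ≤ aFindGo l n i fuel := by
  intro fuel
  induction fuel with
  | zero => intro i; exact Nat.le_refl i
  | succ fuel ih =>
    intro i
    simp only [aFindGo]
    split
    · split
      · exact Nat.le_trans (Nat.le_succ i) (ih (i+1))
      · exact Nat.le_refl i
    · exact Nat.le_refl i

theorem aConsume_ge (l : List Char) (n : Nat) :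
    ∀ (fuel i depth : Nat) (s e : Bool), i ≤ aConsumeGo l n i depth s e fuel := by
  intro fuel
  induction fuel with
  | zero => intro i d s e; exact Nat.le_refl i
  | succ fuel ih =>
    intro i d s e
    simp only [aConsumeGo]
    split
    · split_ifs <;> exact Nat.le_trans (Nat.le_succ i) (ih (i+1) _ _ _)
    · exact Nat.le_refl i

theorem aFind_lt_step (l : List Char) (n i : Nat) (h : i < n) :
    aFind l n i = if l.getD i ' ' != '(' then aFind l n (i+1) else i := by
  unfold aFind
  rw [show n - i = (n - (i+1)) + 1 by omega]
  simp only [aFindGo, if_pos h]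

theorem aConsume_step (l : List Char) (n i d : Nat) (s e : Bool) (h : i < n) (hd : 0 < d) :
    aConsume l n i d s e =
      if l.getD i ' ' == '\\' && !e then
        aConsume l n (i+1) d (if l.getD i ' ' == '\'' && !e then !s else s) true
      else
        if !(if l.getD i ' ' == '\'' && !e then !s else s) then
          if l.getD i ' ' == '(' then
            aConsume l n (i+1) (d+1) (if l.getD i ' ' == '\'' && !e then !s else s) false
          else if l.getD i ' ' == ')' then
            aConsume l n (i+1) (d-1) (if l.getD i ' ' == '\'' && !e then !s else s) false
          else aConsume l n (i+1) d (if l.getD i ' ' == '\'' && !e then !s else s) false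
        else aConsume l n (i+1) d (if l.getD i ' ' == '\'' && !e then !s else s) false := by
  unfold aConsume
  rw [show n - i = (n - (i+1)) + 1 by omega]
  simp only [aConsumeGo, if_pos (show i < n ∧ 0 < d from ⟨h, hd⟩)]

theorem aConsume_none (l : List Char) (n i d : Nat) (s e : Bool) (h : ¬ (i < n ∧ 0 < d)) :
    aConsume l n i d s e = i := by
  unfold aConsume
  cases hf : n - i with
  | zero => rfl
  | succ f => simp only [aConsumeGo, if_neg h]

theorem aOuterGo_irrel (l : List Char) (n : Nat) :
    ∀ (f1 f2 i : Nat) (acc : List String), n ≤ i + f1 → n ≤ i + f2 →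
      aOuterGo l n i acc f1 = aOuterGo l n i acc f2 := by
  intro f1
  induction f1 with
  | zero =>
    intro f2 i acc h1 h2
    cases f2 with
    | zero => rfl
    | succ f2 => simp only [aOuterGo]; rw [if_neg (by omega)]
  | succ f1 ih =>
    intro f2 i acc h1 h2
    cases f2 with
    | zero => simp only [aOuterGo]; rw [if_neg (by omega)]
    | succ f2 =>
      simp only [aOuterGo]
      by_cases hi : i < n
      · rw [if_pos hi, if_pos hi]
        by_cases hj : aFind l n i < n
        · rw [if_pos hj, if_pos hj]
          have hjge : i ≤ aFind l n i := aFind_ge l n (n - i) i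
          have hege : aFind l n i + 1 ≤ aConsume l n (aFind l n i + 1) 1 false false :=
            aConsume_ge l n _ _ _ _ _
          exact ih f2 _ _ (by omega) (by omega)
        · rw [if_neg hj, if_neg hj]
      · rw [if_neg hi, if_neg hi]

theorem aOuter_stop (l : List Char) (n i : Nat) (acc : List String) (h : ¬ i < n) :
    aOuter l n i acc = acc := by
  unfold aOuter
  cases hf : n - i with
  | zero => rfl
  | succ f => simp only [aOuterGo]; rw [if_neg h]

theorem aOuter_notfound (l : List Char) (n i : Nat) (acc : List String)
    (h : i < n) (h2 : ¬ aFind l n i < n) : aOuter l n i acc = acc := by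
  unfold aOuter
  rw [show n - i = (n - (i+1)) + 1 by omega]
  simp only [aOuterGo]
  rw [if_pos h, if_neg h2]

theorem aOuter_found (l : List Char) (n i : Nat) (acc : List String)
    (h : i < n) (h2 : aFind l n i < n) :
    aOuter l n i acc =
      aOuter l n (aConsume l n (aFind l n i + 1) 1 false false)
        (acc ++ [String.ofList ((l.drop (aFind l n i)).take
          (aConsume l n (aFind l n i + 1) 1 false false - aFind l n i))]) := by
  unfold aOuter
  rw [show n - i = (n - (i+1)) + 1 by omega]
  simp only [aOuterGo]
  rw [if_pos h, if_pos h2]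
  have hjge : i ≤ aFind l n i := aFind_ge l n (n - i) i
  have hege : aFind l n i + 1 ≤ aConsume l n (aFind l n i + 1) 1 false false :=
    aConsume_ge l n _ _ _ _ _
  exact aOuterGo_irrel l n _ _ _ _ (by omega) (by omega)

theorem aOuter_skip (l : List Char) (n i : Nat) (acc : List String)
    (hi : i < n) (hne : l.getD i ' ' ≠ '(') :
    aOuter l n i acc = aOuter l n (i+1) acc := by
  have hfind : aFind l n i = aFind l n (i+1) := by
    rw [aFind_lt_step l n i hi, if_pos (by simpa [bne_iff_ne] using hne)]
  by_cases hj : aFind l n (i+1) < n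
  · by_cases hi1 : i + 1 < n
    · rw [aOuter_found l n i acc hi (hfind ▸ hj), aOuter_found l n (i+1) acc hi1 hj, hfind]
    · exact absurd (Nat.lt_of_le_of_lt (aFind_ge l n (n - (i+1)) (i+1)) hj) hi1
  · rw [aOuter_notfound l n i acc hi (by rw [hfind]; exact hj)]
    by_cases hi1 : i + 1 < n
    · rw [aOuter_notfound l n (i+1) acc hi1 hj]
    · rw [aOuter_stop l n (i+1) acc hi1]

theorem main_lemma (l : List Char) : ∀ (rest : List Char) (i : Nat), i ≤ l.length →
    rest = l.drop i →
    ((∀ in_str esc start acc, bGo l i rest 0 in_str esc start acc = aOuter l l.length i acc) ∧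
     (∀ depth in_str esc start acc, 0 < depth →
        bGo l i rest depth in_str esc start acc =
          aOuter l l.length (aConsume l l.length i depth in_str esc)
            (acc ++ [String.ofList ((l.drop start).take
              (aConsume l l.length i depth in_str esc - start))]))) := by
  intro rest
  induction rest with
  | nil =>
    intro i hle hdrop
    have hn : i = l.length := by
      have := List.drop_eq_nil_iff.mp hdrop.symm
      omega
    subst hn
    constructor
    · intro in_str esc start acc
      rw [aOuter_stop l l.length l.length acc (lt_irrefl _)]
      simp [bGo]
    · intro depth in_str esc start acc hd
      rw [aConsume_none l l.length l.length depth in_str esc (by omega)]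
      rw [aOuter_stop l l.length l.length _ (lt_irrefl _)]
      have htake : (l.drop start).take (l.length - start) = l.drop start := by
        apply List.take_of_length_le; simp
      simp [bGo, hd, htake]
  | cons ch rest' ih =>
    intro i hle hdrop
    have hi : i < l.length := by
      by_contra hni
      rw [List.drop_eq_nil_iff.mpr (by omega)] at hdrop
      exact List.cons_ne_nil ch rest' hdrop
    have hg : l[i]? = some ch := by
      have h0 : (l.drop i)[0]? = some ch := by rw [← hdrop]; rfl
      rw [List.getElem?_drop] at h0; simpa using h0
    have hch : l.getD i ' ' = ch := by simp [List.getD, hg]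
    have hdrop' : rest' = l.drop (i+1) := by
      rw [← List.tail_drop, ← hdrop]; rfl
    have ih' := ih (i+1) (by omega) hdrop'
    constructor
    · -- depth = 0 state
      intro in_str esc start acc
      simp only [bGo, reduceIte]
      by_cases hpar : (ch == '(') = true
      · have hfind : aFind l l.length i = i := by
          rw [aFind_lt_step l l.length i hi, hch]
          simp [show ch = '(' from by simpa using hpar]
        rw [if_pos hpar]
        rw [(ih'.2) 1 false false i acc Nat.one_pos]
        rw [aOuter_found l l.length i acc hi (by rw [hfind]; exact hi), hfind]
      · rw [if_neg hpar]
        rw [(ih'.1) in_str esc start acc]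
        exact (aOuter_skip l l.length i acc hi (by rw [hch]; simpa using hpar)).symm
    · -- depth > 0 state
      intro depth in_str esc start acc hd
      rw [aConsume_step l l.length i depth in_str esc hi hd, hch]
      simp only [bGo, if_neg (show ¬ depth = 0 by omega)]
      by_cases hb : (ch == '\\' && !esc) = true
      · rw [if_pos hb, if_pos hb]
        exact (ih'.2) depth _ true start acc hd
      · rw [if_neg hb, if_neg hb]
        by_cases hstr : (!(if (ch == '\'' && !esc) = true then !in_str else in_str)) = true
        · rw [if_pos hstr, if_pos hstr]
          by_cases hpar : (ch == '(') = true
          · rw [if_pos hpar, if_pos hpar]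
            exact (ih'.2) (depth+1) _ false start acc (by omega)
          · rw [if_neg hpar, if_neg hpar]
            by_cases hcl : (ch == ')') = true
            · rw [if_pos hcl, if_pos hcl]
              by_cases hd1 : depth - 1 = 0
              · rw [if_pos hd1]
                rw [aConsume_none l l.length (i+1) (depth-1) _ false (by omega)]
                rw [hd1]
                exact (ih'.1) _ false start _
              · rw [if_neg hd1]
                exact (ih'.2) (depth-1) _ false start acc (by omega)
            · rw [if_neg hcl, if_neg hcl]
              exact (ih'.2) depth _ false start acc hd
        · rw [if_neg hstr, if_neg hstr]
          exact (ih'.2) depth _ false start acc hd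

-- ===== VERDICT (by name: the statement is the Claim_ definition above) =====
theorem split_tuples_spec : Claim_equal_split_tuples := by
  intro block _
  unfold Spec_split_tuples split_tuples split_tuples_alt
  exact ((main_lemma block.toList block.toList 0 (by omega) rfl).1 false false 0 []).symm
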